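-- pv_equiv track=rewrite | github.com/jolieschae/phase3project | game/decompile/base/lib/codecs.py | make_encoding_map
-- ===== SOURCE A (Python) =====
-- def make_encoding_map(decoding_map):
--     m = {}
--     for k, v in decoding_map.items():
--         if v not in m:
--             m[v] = k
--         else:
--             m[v] = None
--
--     return m
-- ===== SOURCE B (Python) =====
-- def make_encoding_map(decoding_map):
--     counts = {}
--     for v in decoding_map.values():
--         counts[v] = counts.get(v, 0) + 1
--     m = {}
--     for k, v in decoding_map.items():
--         if v not in m:
--             m[v] = k if counts[v] == 1 else None
--     return m
-- ===== Notes on version B (the rewrite author's own statement) =====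
-- stated objective: alternative
-- what changed: Replaces A's single-pass overwrite-on-collision with a two-pass count-then-build: first tally value frequencies, then write each value once (its key if unique, None otherwise), never overwriting.
import Mathlib
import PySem

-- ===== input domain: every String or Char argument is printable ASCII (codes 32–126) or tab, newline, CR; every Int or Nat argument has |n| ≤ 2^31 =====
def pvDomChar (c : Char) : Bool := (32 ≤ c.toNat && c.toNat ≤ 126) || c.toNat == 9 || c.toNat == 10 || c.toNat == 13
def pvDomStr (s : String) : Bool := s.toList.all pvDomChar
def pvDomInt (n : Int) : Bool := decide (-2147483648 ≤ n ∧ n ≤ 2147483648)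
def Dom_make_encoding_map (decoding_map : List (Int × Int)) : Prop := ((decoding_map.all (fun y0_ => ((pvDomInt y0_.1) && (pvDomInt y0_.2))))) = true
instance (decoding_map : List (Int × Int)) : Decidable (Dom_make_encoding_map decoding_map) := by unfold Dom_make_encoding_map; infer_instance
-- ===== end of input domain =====

-- B replaces A's single-pass overwrite-on-collision with a two-pass count-then-build (alternative decomposition, same cost).

-- ===== PORT A =====
-- for k, v in decoding_map.items(): if v not in m: m[v] = k else: m[v] = None
def make_encoding_map (decoding_map : List (Int × Int)) : List (Int × Option Int) :=
  (decoding_map.foldl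
    (fun (m : PySem.Dict Int (Option Int)) kv =>
      if m.contains kv.2 = false then m.insert kv.2 (some kv.1)
      else m.insert kv.2 none)
    PySem.Dict.empty).items

-- ===== PORT B =====
-- counts[v] = counts.get(v, 0) + 1 over decoding_map.values(); then build m writing each value once
def make_encoding_map_alt (decoding_map : List (Int × Int)) : List (Int × Option Int) :=
  let counts : PySem.Dict Int Int :=
    (decoding_map.map Prod.snd).foldl
      (fun (d : PySem.Dict Int Int) v => d.insert v (d.getD v 0 + 1)) PySem.Dict.empty
  (decoding_map.foldl
    (fun (m : PySem.Dict Int (Option Int)) kv =>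
      if m.contains kv.2 then m
      else m.insert kv.2 (if counts.getD kv.2 0 = 1 then some kv.1 else none))
    PySem.Dict.empty).items

-- ===== PRECONDITION & SPEC =====
def Spec_make_encoding_map (decoding_map : List (Int × Int)) (out : List (Int × Option Int)) : Prop := out = make_encoding_map_alt decoding_map
instance (decoding_map : List (Int × Int)) (out : List (Int × Option Int)) : Decidable (Spec_make_encoding_map decoding_map out) := by unfold Spec_make_encoding_map; infer_instance

-- ===== CLAIM (what is proved, stated in full; the proofs are below) =====
def Claim_equal_make_encoding_map : Prop := ∀ (decoding_map : List (Int × Int)), Dom_make_encoding_map decoding_map → Spec_make_encoding_map decoding_map (make_encoding_map decoding_map)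

-- ===== LEMMAS AND PROOFS =====

-- invariant: B's partial dict is A's with every value that still occurs in the suffix forced to none
lemma pv_fold_inv (counts : PySem.Dict Int Int) :
    ∀ (S : List (Int × Int)) (mA mB : PySem.Dict Int (Option Int)),
    mA.keys.Nodup →
    mB.items = mA.items.map (fun p => (p.1, if p.1 ∈ S.map Prod.snd then none else p.2)) →
    (∀ w, mA.contains w = false → counts.getD w 0 = ((S.map Prod.snd).count w : Int)) →
    S.foldl (fun m kv => if m.contains kv.2 = false then m.insert kv.2 (some kv.1)
                         else m.insert kv.2 none) mA
      = S.foldl (fun m kv => if m.contains kv.2 then m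
                             else m.insert kv.2 (if counts.getD kv.2 0 = 1 then some kv.1 else none)) mB := by
  intro S
  induction S with
  | nil =>
      intro mA mB _ hitems _
      simp at hitems ⊢
      exact (PySem.Dict.ext hitems.symm)
  | cons kv S' ih =>
      intro mA mB hnd hitems hcnt
      obtain ⟨k, v⟩ := kv
      have hkeys : mB.keys = mA.keys := by
        simp [PySem.Dict.keys, hitems]
      have hcontains : ∀ w, mB.contains w = mA.contains w := by
        intro w
        rw [PySem.Dict.contains_eq_decide_mem_keys, PySem.Dict.contains_eq_decide_mem_keys, hkeys]
      simp only [List.foldl_cons]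
      by_cases h : mA.contains v = true
      · -- collision: A overwrites with none, B skips
        rw [if_neg (by simp [h]), if_pos (by rw [hcontains]; exact h)]
        apply ih
        · rw [PySem.Dict.keys_insert_of_contains (h := h)]; exact hnd
        · rw [hitems, PySem.Dict.items_insert_of_contains (h := h), List.map_map]
          apply List.map_congr_left
          intro p _
          simp only [Function.comp_apply, List.map_cons, List.mem_cons]
          by_cases hp : p.1 = v
          · simp [hp]
          · have h1 : ¬ ((p.1 == v) = true) := by simpa using hp
            rw [if_neg h1]
            by_cases hm : p.1 ∈ List.map Prod.snd S'
            · simp [hm]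
            · simp [hm, hp]
        · intro w hw
          have hwv : w ≠ v := by
            intro he; rw [PySem.Dict.contains_insert] at hw; simp [he] at hw
          have hwA : mA.contains w = false := by
            rw [PySem.Dict.contains_insert] at hw
            simp at hw; exact hw.2
          rw [hcnt w hwA]
          simp [Ne.symm hwv]
      · -- fresh value
        have h' : mA.contains v = false := by simpa using h
        have hB : mB.contains v = false := by rw [hcontains]; exact h'
        rw [if_pos (by simp [h']), if_neg (by simp [hB])]
        have hcv : counts.getD v 0 = 1 + (((S'.map Prod.snd).count v : Nat) : Int) := by
          rw [hcnt v h']; simp; ring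
        have hval : (if counts.getD v 0 = 1 then some k else none)
            = (if v ∈ S'.map Prod.snd then none else some k) := by
          rw [hcv]
          by_cases hm : v ∈ S'.map Prod.snd
          · have : 0 < (S'.map Prod.snd).count v := List.count_pos_iff.mpr hm
            rw [if_neg (by omega), if_pos hm]
          · have : (S'.map Prod.snd).count v = 0 := List.count_eq_zero.mpr hm
            rw [this]; simp [hm]
        apply ih
        · rw [PySem.Dict.keys_insert_of_not_contains (h := h')]
          refine hnd.append (by simp) ?_
          intro a ha hb
          simp only [List.mem_singleton] at hb
          subst hb
          exact absurd ((PySem.Dict.contains_iff_mem_keys _ _).mpr ha) (by simp [h'])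
        · rw [PySem.Dict.items_insert_of_not_contains (h := h'),
              PySem.Dict.items_insert_of_not_contains (h := hB), hitems]
          rw [List.map_append]
          congr 1
          · apply List.map_congr_left
            intro p hp
            have hpv : p.1 ≠ v := by
              intro he
              have : mA.contains p.1 = true :=
                (PySem.Dict.contains_iff_mem_keys _ _).mpr (PySem.Dict.mem_keys_of_mem_items _ hp)
              rw [he] at this; rw [this] at h'; exact absurd h' (by simp)
            simp only [List.map_cons, List.mem_cons]
            by_cases hm : p.1 ∈ List.map Prod.snd S'
            · simp [hm]
            · simp [hm, hpv]
          · simp [hval]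
        · intro w hw
          have hwv : w ≠ v := by
            intro he; rw [PySem.Dict.contains_insert] at hw; simp [he] at hw
          have hwA : mA.contains w = false := by
            rw [PySem.Dict.contains_insert] at hw
            simp at hw; exact hw.2
          rw [hcnt w hwA]
          simp [Ne.symm hwv]

-- ===== VERDICT (by name: the statement is the Claim_ definition above) =====
theorem make_encoding_map_spec : Claim_equal_make_encoding_map := by
  intro decoding_map _
  unfold Spec_make_encoding_map make_encoding_map make_encoding_map_alt
  congr 1
  exact pv_fold_inv _ decoding_map PySem.Dict.empty PySem.Dict.empty (by simp)
    (by simp [PySem.Dict.empty])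
    (by intro w _; rw [PySem.Dict.getD_foldl_insert_add_one]; simp [PySem.Dict.getD_empty])
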